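-- pv_equiv track=rewrite | github.com/ashuttl/linecast | src/linecast/weather.py | _find_temperature_extrema
-- ===== SOURCE A (Python) =====
-- def _find_temperature_extrema(col_temps, graph_w):
--     """Detect prominent peaks and valleys for chart annotations."""
--     extrema = []  # (x, temp, is_peak)
--     if len(col_temps) < 5:
--         return extrema
--
--     min_gap = max(8, graph_w // 15)
--     for i in range(2, len(col_temps) - 2):
--         local = col_temps[max(0, i - 3):i + 4]
--         is_peak = col_temps[i] >= max(local) and (
--             col_temps[i] > col_temps[i - 1] or col_temps[i] > col_temps[i + 1]
--         )
--         is_valley = col_temps[i] <= min(local) and (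
--             col_temps[i] < col_temps[i - 1] or col_temps[i] < col_temps[i + 1]
--         )
--         if not is_peak and not is_valley:
--             continue
--         neighbors_l = col_temps[max(0, i - 15):i]
--         neighbors_r = col_temps[i + 1:min(len(col_temps), i + 16)]
--         if not neighbors_l or not neighbors_r:
--             continue
--         if is_peak:
--             prom = col_temps[i] - max(min(neighbors_l), min(neighbors_r))
--         else:
--             prom = min(max(neighbors_l), max(neighbors_r)) - col_temps[i]
--         if prom < 3:
--             continue
--         if not any(abs(i - ex) < min_gap for ex, _, _ in extrema):
--             extrema.append((i, col_temps[i], is_peak))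
--
--     global_max_x = max(range(len(col_temps)), key=lambda i: col_temps[i])
--     global_min_x = min(range(len(col_temps)), key=lambda i: col_temps[i])
--     for gx, is_peak in [(global_max_x, True), (global_min_x, False)]:
--         if not any(abs(gx - ex) < min_gap and p == is_peak for ex, _, p in extrema):
--             extrema.append((gx, col_temps[gx], is_peak))
--
--     return extrema
-- ===== SOURCE B (Python) =====
-- def _classify(t, i):
--     """True = prominent peak, False = prominent valley, None = neither."""
--     v = t[i]
--     win = t[(i - 3 if i >= 3 else 0):i + 4]
--     if v >= max(win) and (v > t[i - 1] or v > t[i + 1]):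
--         peak = True
--     elif v <= min(win) and (v < t[i - 1] or v < t[i + 1]):
--         peak = False
--     else:
--         return None
--     left = t[(i - 15 if i >= 15 else 0):i]
--     right = t[i + 1:i + 16]
--     if peak:
--         prom = v - max(min(left), min(right))
--     else:
--         prom = min(max(left), max(right)) - v
--     return peak if prom >= 3 else None
--
--
-- def _select(cands, min_gap):
--     """Greedy spacing filter on a candidate list with increasing indices:
--     take the head, drop everything too close to it, repeat."""
--     out = []
--     while cands:
--         i, k = cands[0]
--         out.append((i, k))
--         cands = [c for c in cands[1:] if c[0] - i >= min_gap]
--     return out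
--
--
-- def _find_temperature_extrema(col_temps, graph_w):
--     n = len(col_temps)
--     if n < 5:
--         return []
--     min_gap = max(8, graph_w // 15)
--     # staged pipeline: classify everything, then space, then annotate globals
--     cands = [(i, k) for i in range(2, n - 2)
--              if (k := _classify(col_temps, i)) is not None]
--     extrema = [(i, col_temps[i], k) for i, k in _select(cands, min_gap)]
--     gmax = col_temps.index(max(col_temps))
--     gmin = col_temps.index(min(col_temps))
--     extrema += [(gx, col_temps[gx], pk)
--                 for gx, pk in ((gmax, True), (gmin, False))
--                 if all(abs(gx - ex) >= min_gap or p != pk for ex, _, p in extrema)]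
--     return extrema
-- ===== Notes on version B (the rewrite author's own statement) =====
-- stated objective: alternative
-- what changed: B is a staged pipeline instead of A's single stateful loop: it first builds the full list of prominent candidates by pure classification, then applies a greedy spacing filter that repeatedly takes the head and drops too-close followers (no scan of the accepted list), computes the global argmax/argmin as list.index(max/min) instead of max/min over range with a key, and appends the global annotations via a comprehension over the fixed extrema list instead of a mutating loop.
import Mathlib
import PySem

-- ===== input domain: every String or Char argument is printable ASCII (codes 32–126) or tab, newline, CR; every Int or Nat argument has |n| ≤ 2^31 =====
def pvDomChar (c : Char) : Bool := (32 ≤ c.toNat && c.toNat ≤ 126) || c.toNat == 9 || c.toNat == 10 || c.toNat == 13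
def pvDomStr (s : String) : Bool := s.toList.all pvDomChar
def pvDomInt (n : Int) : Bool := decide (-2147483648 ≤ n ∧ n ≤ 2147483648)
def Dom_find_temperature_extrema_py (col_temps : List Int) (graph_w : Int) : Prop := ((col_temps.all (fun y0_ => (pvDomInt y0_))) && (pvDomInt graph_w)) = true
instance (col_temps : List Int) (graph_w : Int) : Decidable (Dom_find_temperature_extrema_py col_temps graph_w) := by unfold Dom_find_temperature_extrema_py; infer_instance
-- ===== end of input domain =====

-- B restructures A's single stateful loop into a staged pipeline (classify all candidates, then a
-- greedy head-take/drop-too-close spacing filter, then globals via index-of-max appended by a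
-- comprehension over the fixed list); objective: alternative decomposition, same asymptotic cost.

-- ===== PORT A =====
-- A-side loop body (lambda-lifted from A's 'for i in range(2, len(col_temps) - 2)' loop)
def pvAbody (col_temps : List Int) (n min_gap : Int) (extrema : List (Int × Int × Bool)) (i : Int) : List (Int × Int × Bool) :=
  let localw := PySem.List.slice col_temps (some (max 0 (i - 3))) (some (i + 4))
  let ci := PySem.List.pyGetD col_temps i 0
  match PySem.List.max? localw (fun y => y), PySem.List.min? localw (fun y => y) with
  | some mx, some mn =>
    let is_peak : Bool := decide (mx ≤ ci ∧ (PySem.List.pyGetD col_temps (i - 1) 0 < ci ∨ PySem.List.pyGetD col_temps (i + 1) 0 < ci))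
    let is_valley : Bool := decide (ci ≤ mn ∧ (ci < PySem.List.pyGetD col_temps (i - 1) 0 ∨ ci < PySem.List.pyGetD col_temps (i + 1) 0))
    if !is_peak && !is_valley then extrema
    else
      let nl := PySem.List.slice col_temps (some (max 0 (i - 15))) (some i)
      let nr := PySem.List.slice col_temps (some (i + 1)) (some (min n (i + 16)))
      if nl = [] ∨ nr = [] then extrema
      else
        let prom : Int :=
          if is_peak then
            match PySem.List.min? nl (fun y => y), PySem.List.min? nr (fun y => y) with
            | some a, some b => ci - max a b
            | _, _ => 0  -- unreachable: nl and nr are non-empty past the guard above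
          else
            match PySem.List.max? nl (fun y => y), PySem.List.max? nr (fun y => y) with
            | some a, some b => min a b - ci
            | _, _ => 0  -- unreachable
        if prom < 3 then extrema
        else if extrema.any (fun e => decide (|i - e.1| < min_gap)) then extrema
        else extrema ++ [(i, ci, is_peak)]
  | _, _ => extrema  -- unreachable: localw is non-empty for every i of the loop range

def find_temperature_extrema_py (col_temps : List Int) (graph_w : Int) : List (Int × Int × Bool) :=
  if (col_temps.length : Int) < 5 then []
  else
    let n : Int := (col_temps.length : Int)
    let min_gap : Int := max 8 (PySem.Int.floordiv graph_w 15)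
    let extrema := (PySem.List.pyRange 2 (n - 2) 1).foldl (pvAbody col_temps n min_gap) []
    -- .getD 0 is unreachable: the range is non-empty (n ≥ 5), so max?/min? return some
    let gmax : Int := (PySem.List.max? (PySem.List.pyRange 0 n 1) (fun j => PySem.List.pyGetD col_temps j 0)).getD 0
    let gmin : Int := (PySem.List.min? (PySem.List.pyRange 0 n 1) (fun j => PySem.List.pyGetD col_temps j 0)).getD 0
    ([(gmax, true), (gmin, false)] : List (Int × Bool)).foldl
      (fun extrema gp =>
        if extrema.any (fun e => decide (|gp.1 - e.1| < min_gap) && (e.2.2 == gp.2)) then extrema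
        else extrema ++ [(gp.1, PySem.List.pyGetD col_temps gp.1 0, gp.2)]) extrema

-- ===== PORT B =====
-- _classify from Source B: True = prominent peak, False = prominent valley, none = neither
def pvClassify (t : List Int) (i : Int) : Option Bool :=
  let v := PySem.List.pyGetD t i 0
  let win := PySem.List.slice t (some (if 3 ≤ i then i - 3 else 0)) (some (i + 4))
  match PySem.List.max? win (fun y => y), PySem.List.min? win (fun y => y) with
  | some mx, some mn =>
    let peak? : Option Bool :=
      if mx ≤ v ∧ (PySem.List.pyGetD t (i - 1) 0 < v ∨ PySem.List.pyGetD t (i + 1) 0 < v) then some true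
      else if v ≤ mn ∧ (v < PySem.List.pyGetD t (i - 1) 0 ∨ v < PySem.List.pyGetD t (i + 1) 0) then some false
      else none
    match peak? with
    | none => none
    | some peak =>
      let left := PySem.List.slice t (some (if 15 ≤ i then i - 15 else 0)) (some i)
      let right := PySem.List.slice t (some (i + 1)) (some (i + 16))
      let prom : Int :=
        if peak then
          match PySem.List.min? left (fun y => y), PySem.List.min? right (fun y => y) with
          | some a, some b => v - max a b
          | _, _ => 0  -- unreachable at B's call sites: left and right are non-empty
        else
          match PySem.List.max? left (fun y => y), PySem.List.max? right (fun y => y) with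
          | some a, some b => min a b - v
          | _, _ => 0  -- unreachable
      if 3 ≤ prom then some peak else none
  | _, _ => none  -- unreachable at B's call sites: win is non-empty

-- _select from Source B: the while loop rebinds 'cands' to a filtered tail each iteration, which is
-- exactly this structural recursion on the shrinking candidate list
def pvSelect (g : Int) : List (Int × Bool) → List (Int × Bool)
  | [] => []
  | c :: rest => c :: pvSelect g (rest.filter (fun d => decide (g ≤ d.1 - c.1)))
  termination_by l => l.length
  decreasing_by simpa using Nat.lt_succ_of_le (le_trans (List.length_filter_le _ _) (by simp))

def find_temperature_extrema_py_alt (col_temps : List Int) (graph_w : Int) : List (Int × Int × Bool) :=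
  if (col_temps.length : Int) < 5 then []
  else
    let n : Int := (col_temps.length : Int)
    let min_gap : Int := max 8 (PySem.Int.floordiv graph_w 15)
    let cands := (PySem.List.pyRange 2 (n - 2) 1).filterMap
      (fun i => (pvClassify col_temps i).map (fun k => (i, k)))
    let extrema := (pvSelect min_gap cands).map
      (fun c => (c.1, PySem.List.pyGetD col_temps c.1 0, c.2))
    -- .getD 0 is unreachable: the maximum/minimum value is a member of the non-empty list
    let gmax : Int := (((PySem.List.index? col_temps ((PySem.List.max? col_temps (fun y => y)).getD 0)).getD 0 : Nat) : Int)
    let gmin : Int := (((PySem.List.index? col_temps ((PySem.List.min? col_temps (fun y => y)).getD 0)).getD 0 : Nat) : Int)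
    extrema ++ (([(gmax, true), (gmin, false)] : List (Int × Bool)).filter
      (fun gp => extrema.all (fun e => decide (min_gap ≤ |gp.1 - e.1|) || !(e.2.2 == gp.2)))).map
      (fun gp => (gp.1, PySem.List.pyGetD col_temps gp.1 0, gp.2))

-- ===== PRECONDITION & SPEC =====
def Spec_find_temperature_extrema_py (col_temps : List Int) (graph_w : Int) (out : List (Int × Int × Bool)) : Prop := out = find_temperature_extrema_py_alt col_temps graph_w
instance (col_temps : List Int) (graph_w : Int) (out : List (Int × Int × Bool)) : Decidable (Spec_find_temperature_extrema_py col_temps graph_w out) := by unfold Spec_find_temperature_extrema_py; infer_instance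

-- ===== CLAIM (what is proved, stated in full; the proofs are below) =====
def Claim_equal_find_temperature_extrema_py : Prop := ∀ (col_temps : List Int) (graph_w : Int), Dom_find_temperature_extrema_py col_temps graph_w → Spec_find_temperature_extrema_py col_temps graph_w (find_temperature_extrema_py col_temps graph_w)

-- ===== LEMMAS AND PROOFS =====

lemma pv_if_eq (i c : Int) : (if c ≤ i then i - c else 0) = max 0 (i - c) := by
  split <;> omega

lemma pv_slice_min (t : List Int) (a b : Int) (h0 : 0 ≤ a) (hb : 0 ≤ b) :
    PySem.List.slice t (some a) (some (min (t.length : Int) b)) = PySem.List.slice t (some a) (some b) := by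
  rw [PySem.List.slice_toNat t h0 (by omega), PySem.List.slice_toNat t h0 hb]
  by_cases h : b ≤ (t.length : Int)
  · rw [min_eq_right h]
  · rw [min_eq_left (by omega)]
    rw [List.take_of_length_le (by simp), List.take_of_length_le (by simp; omega)]

lemma pv_slice_ne_nil (t : List Int) (a b : Int) (h0 : 0 ≤ a) (hab : a < b) (hal : a < (t.length : Int)) :
    PySem.List.slice t (some a) (some b) ≠ [] := by
  rw [PySem.List.slice_toNat t h0 (by omega)]
  intro h
  have := congrArg List.length h
  simp at this
  omega

lemma pv_body_eq (t : List Int) (g : Int) (i : Int)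
    (h2 : 2 ≤ i) (hi : i < (t.length : Int) - 2) (ext : List (Int × Int × Bool)) :
    pvAbody t (t.length : Int) g ext i =
      (match pvClassify t i with
      | none => ext
      | some k => if ext.any (fun e => decide (|i - e.1| < g)) then ext
                  else ext ++ [(i, PySem.List.pyGetD t i 0, k)]) := by
  have hn5 : (5 : Int) ≤ (t.length : Int) := by omega
  unfold pvAbody pvClassify
  rw [pv_if_eq i 3, pv_if_eq i 15, pv_slice_min t (i + 1) (i + 16) (by omega) (by omega)]
  simp only []
  have hwin : PySem.List.slice t (some (max 0 (i - 3))) (some (i + 4)) ≠ [] :=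
    pv_slice_ne_nil t _ _ (by omega) (by omega) (by omega)
  obtain ⟨mx, hmx⟩ : ∃ mx, PySem.List.max? (PySem.List.slice t (some (max 0 (i - 3))) (some (i + 4))) (fun y => y) = some mx := by
    rcases h : PySem.List.max? (PySem.List.slice t (some (max 0 (i - 3))) (some (i + 4))) (fun y => y) with _ | mx
    · exact absurd ((PySem.List.max?_eq_none_iff _ _).1 h) hwin
    · exact ⟨mx, rfl⟩
  obtain ⟨mn, hmn⟩ : ∃ mn, PySem.List.min? (PySem.List.slice t (some (max 0 (i - 3))) (some (i + 4))) (fun y => y) = some mn := by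
    rcases h : PySem.List.min? (PySem.List.slice t (some (max 0 (i - 3))) (some (i + 4))) (fun y => y) with _ | mn
    · exact absurd ((PySem.List.min?_eq_none_iff _ _).1 h) hwin
    · exact ⟨mn, rfl⟩
  have hnl : PySem.List.slice t (some (max 0 (i - 15))) (some i) ≠ [] :=
    pv_slice_ne_nil t _ _ (by omega) (by omega) (by omega)
  have hnr : PySem.List.slice t (some (i + 1)) (some (i + 16)) ≠ [] :=
    pv_slice_ne_nil t _ _ (by omega) (by omega) (by omega)
  obtain ⟨la, hla⟩ : ∃ a, PySem.List.min? (PySem.List.slice t (some (max 0 (i - 15))) (some i)) (fun y => y) = some a := by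
    rcases h : PySem.List.min? (PySem.List.slice t (some (max 0 (i - 15))) (some i)) (fun y => y) with _ | a
    · exact absurd ((PySem.List.min?_eq_none_iff _ _).1 h) hnl
    · exact ⟨a, rfl⟩
  obtain ⟨ra, hra⟩ : ∃ a, PySem.List.min? (PySem.List.slice t (some (i + 1)) (some (i + 16))) (fun y => y) = some a := by
    rcases h : PySem.List.min? (PySem.List.slice t (some (i + 1)) (some (i + 16))) (fun y => y) with _ | a
    · exact absurd ((PySem.List.min?_eq_none_iff _ _).1 h) hnr
    · exact ⟨a, rfl⟩
  obtain ⟨lb, hlb⟩ : ∃ a, PySem.List.max? (PySem.List.slice t (some (max 0 (i - 15))) (some i)) (fun y => y) = some a := by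
    rcases h : PySem.List.max? (PySem.List.slice t (some (max 0 (i - 15))) (some i)) (fun y => y) with _ | a
    · exact absurd ((PySem.List.max?_eq_none_iff _ _).1 h) hnl
    · exact ⟨a, rfl⟩
  obtain ⟨rb, hrb⟩ : ∃ a, PySem.List.max? (PySem.List.slice t (some (i + 1)) (some (i + 16))) (fun y => y) = some a := by
    rcases h : PySem.List.max? (PySem.List.slice t (some (i + 1)) (some (i + 16))) (fun y => y) with _ | a
    · exact absurd ((PySem.List.max?_eq_none_iff _ _).1 h) hnr
    · exact ⟨a, rfl⟩
  simp only [hmx, hmn, hla, hra, hlb, hrb]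
  have hne : ¬ (PySem.List.slice t (some (max 0 (i - 15))) (some i) = [] ∨
      PySem.List.slice t (some (i + 1)) (some (i + 16)) = []) := by
    exact not_or_intro hnl hnr
  by_cases hpk : mx ≤ PySem.List.pyGetD t i 0 ∧
      (PySem.List.pyGetD t (i - 1) 0 < PySem.List.pyGetD t i 0 ∨ PySem.List.pyGetD t (i + 1) 0 < PySem.List.pyGetD t i 0)
  · by_cases h3 : PySem.List.pyGetD t i 0 - max la ra < 3
    · simp [hpk, hne, h3, not_le.2 h3]
    · simp [hpk, hne, h3, not_lt.1 h3]
  · by_cases hv : PySem.List.pyGetD t i 0 ≤ mn ∧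
        (PySem.List.pyGetD t i 0 < PySem.List.pyGetD t (i - 1) 0 ∨ PySem.List.pyGetD t i 0 < PySem.List.pyGetD t (i + 1) 0)
    · by_cases h3 : min lb rb - PySem.List.pyGetD t i 0 < 3
      · simp [hpk, hv, hne, h3, not_le.2 h3]
      · simp [hpk, hv, hne, h3, not_lt.1 h3]
    · simp [hpk, hv]

-- B's candidate list from an arbitrary loop start a (with a = 2 it is B's 'cands')
def pvCandsFrom (t : List Int) (a : Int) : List (Int × Bool) :=
  (PySem.List.pyRange a ((t.length : Int) - 2) 1).filterMap
    (fun i => (pvClassify t i).map (fun k => (i, k)))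

-- the pending gap constraint carried by A's loop state: none before the first accepted extremum
def pvFilt (g : Int) (l : Option Int) (cs : List (Int × Bool)) : List (Int × Bool) :=
  match l with
  | none => cs
  | some lv => cs.filter (fun c => decide (g ≤ c.1 - lv))

def pvAnnot (t : List Int) (c : Int × Bool) : Int × Int × Bool :=
  (c.1, PySem.List.pyGetD t c.1 0, c.2)

-- invariant of A's loop state: l is the (maximal) index of the last accepted extremum, all < a
def pvInv (ext : List (Int × Int × Bool)) (l : Option Int) (a : Int) : Prop :=
  match l with
  | none => ext = []
  | some lv => lv < a ∧ (∃ e ∈ ext, e.1 = lv) ∧ ∀ e ∈ ext, e.1 ≤ lv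

lemma pv_filter_absorb (g lv a : Int) (h : lv < a) (cs : List (Int × Bool)) :
    (cs.filter (fun c => decide (g ≤ c.1 - lv))).filter (fun c => decide (g ≤ c.1 - a))
      = cs.filter (fun c => decide (g ≤ c.1 - a)) := by
  rw [List.filter_filter]
  apply List.filter_congr
  intro c _
  by_cases hc : g ≤ c.1 - a
  · have : g ≤ c.1 - lv := by omega
    simp [hc, this]
  · simp [hc]

lemma pvSelect_nil (g : Int) : pvSelect g [] = [] := by rw [pvSelect]

lemma pvSelect_cons (g : Int) (c : Int × Bool) (rest : List (Int × Bool)) :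
    pvSelect g (c :: rest) = c :: pvSelect g (rest.filter (fun d => decide (g ≤ d.1 - c.1))) := by
  rw [pvSelect]

lemma pv_fold_eq (t : List Int) (g : Int) :
    ∀ (k : Nat) (a : Int) (ext : List (Int × Int × Bool)) (l : Option Int), 2 ≤ a →
      (((t.length : Int) - 2) - a).toNat = k → pvInv ext l a →
      (PySem.List.pyRange a ((t.length : Int) - 2) 1).foldl (pvAbody t (t.length : Int) g) ext
        = ext ++ (pvSelect g (pvFilt g l (pvCandsFrom t a))).map (pvAnnot t) := by
  intro k
  induction k with
  | zero =>
    intro a ext l ha hk _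
    rw [PySem.List.pyRange_one_eq_nil (by omega)]
    unfold pvCandsFrom
    rw [PySem.List.pyRange_one_eq_nil (by omega)]
    cases l <;> simp [pvFilt, pvSelect_nil]
  | succ k ih =>
    intro a ext l ha hk hinv
    have hlt : a < (t.length : Int) - 2 := by omega
    have hcands : pvCandsFrom t a =
        (match pvClassify t a with
          | none => pvCandsFrom t (a + 1)
          | some kind => (a, kind) :: pvCandsFrom t (a + 1)) := by
      unfold pvCandsFrom
      rw [PySem.List.pyRange_one_cons hlt, List.filterMap_cons]
      rcases pvClassify t a with _ | kind <;> simp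
    rw [PySem.List.pyRange_one_cons hlt]
    simp only [List.foldl_cons]
    rw [pv_body_eq t g a ha hlt ext, hcands]
    rcases hc : pvClassify t a with _ | kind
    · simp only []
      apply ih (a + 1) ext l (by omega) (by omega)
      rcases l with _ | lv
      · exact hinv
      · obtain ⟨h1, h2, h3⟩ := hinv
        exact ⟨by omega, h2, h3⟩
    · simp only []
      rcases l with _ | lv
      · have hext : ext = [] := hinv
        subst hext
        simp only [List.any_nil, Bool.false_eq_true, if_false]
        rw [ih (a + 1) _ (some a) (by omega) (by omega)
          ⟨by omega, ⟨(a, PySem.List.pyGetD t a 0, kind), by simp, rfl⟩, by intro e he; simp at he; simp [he]⟩]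
        simp only [pvFilt]
        rw [pvSelect_cons]
        simp [pvAnnot]
      · obtain ⟨hlv, ⟨e0, he0m, he0⟩, hall⟩ := hinv
        have hany : ext.any (fun e => decide (|a - e.1| < g)) = decide (a - lv < g) := by
          by_cases hg : a - lv < g
          · rw [decide_eq_true hg]
            rw [List.any_eq_true]
            exact ⟨e0, he0m, by rw [decide_eq_true]; rw [he0]; rw [abs_of_nonneg (by omega)]; omega⟩
          · rw [decide_eq_false hg]
            rw [List.any_eq_false]
            intro e he
            have := hall e he
            simp only [decide_eq_true_eq]
            rw [abs_of_nonneg (by omega)]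
            omega
        rw [hany]
        by_cases hg : a - lv < g
        · rw [decide_eq_true hg]
          simp only [if_true]
          rw [ih (a + 1) ext (some lv) (by omega) (by omega) ⟨by omega, ⟨e0, he0m, he0⟩, hall⟩]
          have hx : ¬ g ≤ a - lv := by omega
          have : pvFilt g (some lv) ((a, kind) :: pvCandsFrom t (a + 1))
              = pvFilt g (some lv) (pvCandsFrom t (a + 1)) := by
            simp only [pvFilt]
            rw [List.filter_cons, if_neg (by simpa using hx)]
          rw [this]
        · rw [decide_eq_false hg]
          simp only [Bool.false_eq_true, if_false]
          rw [ih (a + 1) _ (some a) (by omega) (by omega)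
            ⟨by omega, ⟨(a, PySem.List.pyGetD t a 0, kind), by simp, rfl⟩, ?_⟩]
          · have hx : g ≤ a - lv := by omega
            have hkeep : pvFilt g (some lv) ((a, kind) :: pvCandsFrom t (a + 1))
                = (a, kind) :: (pvCandsFrom t (a + 1)).filter (fun c => decide (g ≤ c.1 - lv)) := by
              simp only [pvFilt]
              rw [List.filter_cons, if_pos (by simpa using hx)]
            rw [hkeep, pvSelect_cons]
            simp only [pvFilt]
            rw [pv_filter_absorb g lv a hlv]
            simp [pvAnnot]
          · intro e he
            rcases List.mem_append.1 he with h | h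
            · have := hall e h; omega
            · simp at h; simp [h]

-- first-extremum characterisation of max?/min?: some split pre ++ m :: suf with pre strictly below m
lemma pv_max?_first (key : Int → Int) : ∀ (xs : List Int) (x m : Int),
    PySem.List.max? (x :: xs) key = some m →
    ∃ pre suf, x :: xs = pre ++ m :: suf ∧ ∀ y ∈ pre, key y < key m := by
  intro xs
  induction xs with
  | nil =>
    intro x m h
    simp [PySem.List.max?] at h
    exact ⟨[], [], by simp [h], by simp⟩
  | cons y t ih =>
    intro x m h
    have hstep : PySem.List.max? (x :: y :: t) key
        = PySem.List.max? ((if key x < key y then y else x) :: t) key := by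
      by_cases hxy : key x < key y <;> simp [PySem.List.max?, List.foldl_cons, hxy]
    rw [hstep] at h
    obtain ⟨pre, suf, hsplit, hlt⟩ := ih _ m h
    have hle : key (if key x < key y then y else x) ≤ key m :=
      PySem.List.max?_isMax h _ List.mem_cons_self
    by_cases hxy : key x < key y
    · rw [if_pos hxy] at hsplit hle
      refine ⟨x :: pre, suf, by rw [List.cons_append, ← hsplit], ?_⟩
      intro z hz
      rcases List.mem_cons.1 hz with h1 | h1
      · subst h1; omega
      · exact hlt z h1
    · rw [if_neg hxy] at hsplit hle
      rcases pre with _ | ⟨p0, pre2⟩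
      · simp only [List.nil_append] at hsplit
        have hx := List.head_eq_of_cons_eq hsplit
        exact ⟨[], y :: t, by simp [hx], by simp⟩
      · obtain hx := List.head_eq_of_cons_eq hsplit
        obtain ht := List.tail_eq_of_cons_eq hsplit
        have hxm : key x < key m := hx ▸ hlt p0 (by simp)
        refine ⟨x :: y :: pre2, suf, ?_, ?_⟩
        · simp only [List.cons_append]
          rw [ht]; rfl
        · intro z hz
          rcases List.mem_cons.1 hz with h1 | h1
          · subst h1; exact hxm
          rcases List.mem_cons.1 h1 with h2 | h2
          · subst h2; omega
          · exact hlt z (by simp [h2])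

lemma pv_min?_first (key : Int → Int) : ∀ (xs : List Int) (x m : Int),
    PySem.List.min? (x :: xs) key = some m →
    ∃ pre suf, x :: xs = pre ++ m :: suf ∧ ∀ y ∈ pre, key m < key y := by
  intro xs
  induction xs with
  | nil =>
    intro x m h
    simp [PySem.List.min?] at h
    exact ⟨[], [], by simp [h], by simp⟩
  | cons y t ih =>
    intro x m h
    have hstep : PySem.List.min? (x :: y :: t) key
        = PySem.List.min? ((if key y < key x then y else x) :: t) key := by
      by_cases hxy : key y < key x <;> simp [PySem.List.min?, List.foldl_cons, hxy]
    rw [hstep] at h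
    obtain ⟨pre, suf, hsplit, hlt⟩ := ih _ m h
    have hle : key m ≤ key (if key y < key x then y else x) :=
      PySem.List.min?_isMin h _ List.mem_cons_self
    by_cases hxy : key y < key x
    · rw [if_pos hxy] at hsplit hle
      refine ⟨x :: pre, suf, by rw [List.cons_append, ← hsplit], ?_⟩
      intro z hz
      rcases List.mem_cons.1 hz with h1 | h1
      · subst h1; omega
      · exact hlt z h1
    · rw [if_neg hxy] at hsplit hle
      rcases pre with _ | ⟨p0, pre2⟩
      · simp only [List.nil_append] at hsplit
        have hx := List.head_eq_of_cons_eq hsplit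
        exact ⟨[], y :: t, by simp [hx], by simp⟩
      · obtain hx := List.head_eq_of_cons_eq hsplit
        obtain ht := List.tail_eq_of_cons_eq hsplit
        have hxm : key m < key x := hx ▸ hlt p0 (by simp)
        refine ⟨x :: y :: pre2, suf, ?_, ?_⟩
        · simp only [List.cons_append]
          rw [ht]; rfl
        · intro z hz
          rcases List.mem_cons.1 hz with h1 | h1
          · subst h1; exact hxm
          rcases List.mem_cons.1 h1 with h2 | h2
          · subst h2; omega
          · exact hlt z (by simp [h2])

-- A's first argmax over range(0, n) = B's t.index(max(t)) (and dually for the minimum)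
lemma pv_argmax_eq (t : List Int) (h : t ≠ []) :
    (PySem.List.max? (PySem.List.pyRange 0 (t.length : Int) 1) (fun j => PySem.List.pyGetD t j 0)).getD 0
      = (((PySem.List.index? t ((PySem.List.max? t (fun y => y)).getD 0)).getD 0 : Nat) : Int) := by
  have hn : (0 : Int) < (t.length : Int) := by
    cases t with
    | nil => exact absurd rfl h
    | cons x xs => simp
  -- A side
  obtain ⟨gA, hA⟩ : ∃ gA, PySem.List.max? (PySem.List.pyRange 0 (t.length : Int) 1) (fun j => PySem.List.pyGetD t j 0) = some gA := by
    rcases hh : PySem.List.max? (PySem.List.pyRange 0 (t.length : Int) 1) (fun j => PySem.List.pyGetD t j 0) with _ | gA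
    · have := (PySem.List.max?_eq_none_iff _ _).1 hh
      rw [PySem.List.pyRange_one_cons hn] at this
      simp at this
    · exact ⟨gA, rfl⟩
  have hAmem : gA ∈ PySem.List.pyRange 0 (t.length : Int) 1 := PySem.List.max?_mem hA
  have hArange : 0 ≤ gA ∧ gA < (t.length : Int) := by
    have := (PySem.List.mem_pyRange_one).1 hAmem
    exact this
  have hAmax : ∀ j ∈ PySem.List.pyRange 0 (t.length : Int) 1,
      PySem.List.pyGetD t j 0 ≤ PySem.List.pyGetD t gA 0 := PySem.List.max?_isMax hA
  have hAfirst : ∀ j, 0 ≤ j → j < gA → PySem.List.pyGetD t j 0 < PySem.List.pyGetD t gA 0 := by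
    have hcons := PySem.List.pyRange_one_cons hn
    rw [hcons] at hA
    obtain ⟨pre, suf, hsplit, hlt⟩ := pv_max?_first _ _ _ _ hA
    intro j hj0 hjg
    have hjmem : j ∈ PySem.List.pyRange 0 (t.length : Int) 1 :=
      PySem.List.mem_pyRange_one.2 ⟨hj0, by omega⟩
    rw [hcons, hsplit] at hjmem
    have hpw : (PySem.List.pyRange 0 (t.length : Int) 1).Pairwise (· < ·) :=
      PySem.List.pairwise_lt_pyRange_one 0 _
    rw [hcons, hsplit, List.pairwise_append] at hpw
    rcases List.mem_append.1 hjmem with hjp | hjc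
    · exact hlt j hjp
    · rcases List.mem_cons.1 hjc with h1 | h1
      · omega
      · have := (List.pairwise_cons.1 hpw.2.1).1 j h1
        omega
  -- B side
  obtain ⟨M, hM⟩ : ∃ M, PySem.List.max? t (fun y => y) = some M := by
    rcases hh : PySem.List.max? t (fun y => y) with _ | M
    · exact absurd ((PySem.List.max?_eq_none_iff _ _).1 hh) h
    · exact ⟨M, rfl⟩
  have hMmax : ∀ y ∈ t, y ≤ M := PySem.List.max?_isMax hM
  obtain ⟨i, hi⟩ : ∃ i, PySem.List.index? t M = some i := by
    rcases hh : PySem.List.index? t M with _ | i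
    · rw [PySem.List.index?_eq_none_iff] at hh
      exact absurd (PySem.List.max?_mem hM) hh
    · exact ⟨i, rfl⟩
  obtain ⟨hilen, hieq, hifirst⟩ := PySem.List.getElem_of_index?_eq_some hi
  rw [hA, hM]
  simp only [Option.getD_some]
  rw [hi]
  simp only [Option.getD_some]
  -- the two first-argmax indices coincide
  have hgetA : PySem.List.pyGetD t gA 0 = t[gA.toNat]'(by omega) :=
    PySem.List.pyGetD_eq_getElem t 0 hArange.1 hArange.2
  rcases lt_trichotomy gA (i : Int) with hlt | heq | hgt
  · exfalso
    -- t[gA] < M = t[i], contradicting that gA is a maximum of all indices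
    have hgaN : gA.toNat < i := by omega
    have hne : t[gA.toNat]'(by omega) ≠ M := hifirst gA.toNat hgaN
    have hle : t[gA.toNat]'(by omega) ≤ M := hMmax _ (List.getElem_mem _)
    have himem : ((i : Nat) : Int) ∈ PySem.List.pyRange 0 (t.length : Int) 1 :=
      PySem.List.mem_pyRange_one.2 ⟨by omega, by omega⟩
    have := hAmax _ himem
    rw [hgetA, PySem.List.pyGetD_eq_getElem t 0 (by omega) (by omega)] at this
    simp only [Int.toNat_natCast] at this
    rw [hieq] at this
    omega
  · omega
  · exfalso
    -- t[i] = M ≥ t[gA], contradicting that indices before gA are strictly smaller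
    have := hAfirst (i : Int) (by omega) hgt
    rw [hgetA, PySem.List.pyGetD_eq_getElem t 0 (by omega) (by omega)] at this
    simp only [Int.toNat_natCast] at this
    rw [hieq] at this
    have : t[gA.toNat]'(by omega) ≤ M := hMmax _ (List.getElem_mem _)
    omega

lemma pv_argmin_eq (t : List Int) (h : t ≠ []) :
    (PySem.List.min? (PySem.List.pyRange 0 (t.length : Int) 1) (fun j => PySem.List.pyGetD t j 0)).getD 0
      = (((PySem.List.index? t ((PySem.List.min? t (fun y => y)).getD 0)).getD 0 : Nat) : Int) := by
  have hn : (0 : Int) < (t.length : Int) := by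
    cases t with
    | nil => exact absurd rfl h
    | cons x xs => simp
  obtain ⟨gA, hA⟩ : ∃ gA, PySem.List.min? (PySem.List.pyRange 0 (t.length : Int) 1) (fun j => PySem.List.pyGetD t j 0) = some gA := by
    rcases hh : PySem.List.min? (PySem.List.pyRange 0 (t.length : Int) 1) (fun j => PySem.List.pyGetD t j 0) with _ | gA
    · have := (PySem.List.min?_eq_none_iff _ _).1 hh
      rw [PySem.List.pyRange_one_cons hn] at this
      simp at this
    · exact ⟨gA, rfl⟩
  have hAmem : gA ∈ PySem.List.pyRange 0 (t.length : Int) 1 := PySem.List.min?_mem hA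
  have hArange : 0 ≤ gA ∧ gA < (t.length : Int) := by
    have := (PySem.List.mem_pyRange_one).1 hAmem
    exact this
  have hAmin : ∀ j ∈ PySem.List.pyRange 0 (t.length : Int) 1,
      PySem.List.pyGetD t gA 0 ≤ PySem.List.pyGetD t j 0 := PySem.List.min?_isMin hA
  have hAfirst : ∀ j, 0 ≤ j → j < gA → PySem.List.pyGetD t gA 0 < PySem.List.pyGetD t j 0 := by
    have hcons := PySem.List.pyRange_one_cons hn
    rw [hcons] at hA
    obtain ⟨pre, suf, hsplit, hlt⟩ := pv_min?_first _ _ _ _ hA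
    intro j hj0 hjg
    have hjmem : j ∈ PySem.List.pyRange 0 (t.length : Int) 1 :=
      PySem.List.mem_pyRange_one.2 ⟨hj0, by omega⟩
    rw [hcons, hsplit] at hjmem
    have hpw : (PySem.List.pyRange 0 (t.length : Int) 1).Pairwise (· < ·) :=
      PySem.List.pairwise_lt_pyRange_one 0 _
    rw [hcons, hsplit, List.pairwise_append] at hpw
    rcases List.mem_append.1 hjmem with hjp | hjc
    · exact hlt j hjp
    · rcases List.mem_cons.1 hjc with h1 | h1
      · omega
      · have := (List.pairwise_cons.1 hpw.2.1).1 j h1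
        omega
  obtain ⟨M, hM⟩ : ∃ M, PySem.List.min? t (fun y => y) = some M := by
    rcases hh : PySem.List.min? t (fun y => y) with _ | M
    · exact absurd ((PySem.List.min?_eq_none_iff _ _).1 hh) h
    · exact ⟨M, rfl⟩
  have hMmin : ∀ y ∈ t, M ≤ y := PySem.List.min?_isMin hM
  obtain ⟨i, hi⟩ : ∃ i, PySem.List.index? t M = some i := by
    rcases hh : PySem.List.index? t M with _ | i
    · rw [PySem.List.index?_eq_none_iff] at hh
      exact absurd (PySem.List.min?_mem hM) hh
    · exact ⟨i, rfl⟩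
  obtain ⟨hilen, hieq, hifirst⟩ := PySem.List.getElem_of_index?_eq_some hi
  rw [hA, hM]
  simp only [Option.getD_some]
  rw [hi]
  simp only [Option.getD_some]
  have hgetA : PySem.List.pyGetD t gA 0 = t[gA.toNat]'(by omega) :=
    PySem.List.pyGetD_eq_getElem t 0 hArange.1 hArange.2
  rcases lt_trichotomy gA (i : Int) with hlt | heq | hgt
  · exfalso
    have hgaN : gA.toNat < i := by omega
    have hne : t[gA.toNat]'(by omega) ≠ M := hifirst gA.toNat hgaN
    have hle : M ≤ t[gA.toNat]'(by omega) := hMmin _ (List.getElem_mem _)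
    have himem : ((i : Nat) : Int) ∈ PySem.List.pyRange 0 (t.length : Int) 1 :=
      PySem.List.mem_pyRange_one.2 ⟨by omega, by omega⟩
    have := hAmin _ himem
    rw [hgetA, PySem.List.pyGetD_eq_getElem t 0 (by omega) (by omega)] at this
    simp only [Int.toNat_natCast] at this
    rw [hieq] at this
    omega
  · omega
  · exfalso
    have := hAfirst (i : Int) (by omega) hgt
    rw [hgetA, PySem.List.pyGetD_eq_getElem t 0 (by omega) (by omega)] at this
    simp only [Int.toNat_natCast] at this
    rw [hieq] at this
    have : M ≤ t[gA.toNat]'(by omega) := hMmin _ (List.getElem_mem _)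
    omega

lemma pv_all_not_any (ext : List (Int × Int × Bool)) (gx : Int) (pk : Bool) (g : Int) :
    ext.all (fun e => decide (g ≤ |gx - e.1|) || !(e.2.2 == pk))
      = !ext.any (fun e => decide (|gx - e.1| < g) && (e.2.2 == pk)) := by
  induction ext with
  | nil => rfl
  | cons e ext ih =>
    simp only [List.all_cons, List.any_cons, Bool.not_or, ih]
    congr 1
    by_cases h : |gx - e.1| < g
    · simp [h, not_le.2 h]
    · simp [h, not_lt.1 h]

-- A's mutating two-step append of the globals = B's comprehension over the fixed extrema list
lemma pv_globals (t : List Int) (ext : List (Int × Int × Bool)) (g gmax gmin : Int) :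
    ([(gmax, true), (gmin, false)] : List (Int × Bool)).foldl
      (fun extrema gp =>
        if extrema.any (fun e => decide (|gp.1 - e.1| < g) && (e.2.2 == gp.2)) then extrema
        else extrema ++ [(gp.1, PySem.List.pyGetD t gp.1 0, gp.2)]) ext
    = ext ++ (([(gmax, true), (gmin, false)] : List (Int × Bool)).filter
        (fun gp => ext.all (fun e => decide (g ≤ |gp.1 - e.1|) || !(e.2.2 == gp.2)))).map
        (fun gp => (gp.1, PySem.List.pyGetD t gp.1 0, gp.2)) := by
  simp only [List.foldl_cons, List.foldl_nil, List.filter_cons, List.filter_nil, pv_all_not_any]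
  cases hA : (ext.any fun e => decide (|gmax - e.1| < g) && e.2.2 == true) <;>
    cases hB : (ext.any fun e => decide (|gmin - e.1| < g) && e.2.2 == false) <;>
      simp_all [List.any_append] <;> exact hB

-- ===== VERDICT (by name: the statement is the Claim_ definition above) =====
set_option maxHeartbeats 1000000 in
theorem find_temperature_extrema_py_spec : Claim_equal_find_temperature_extrema_py := by
  intro t w _
  unfold Spec_find_temperature_extrema_py
  unfold find_temperature_extrema_py find_temperature_extrema_py_alt
  by_cases h5 : (t.length : Int) < 5
  · rw [if_pos h5, if_pos h5]
  · rw [if_neg h5, if_neg h5]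
    simp only []
    set g := max 8 (PySem.Int.floordiv w 15) with hg
    have hne : t ≠ [] := by intro hnil; subst hnil; simp at h5
    have hmain := pv_fold_eq t g ((((t.length : Int) - 2) - 2).toNat) 2 [] none (le_refl 2) rfl rfl
    rw [hmain]
    rw [pv_argmax_eq t hne, pv_argmin_eq t hne]
    rw [pv_globals]
    rfl
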